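-- pv_equiv track=rewrite | github.com/Cocorico84/chess_tournament | controllers/controller.py | get_pairs_by_point
-- ===== SOURCE A (Python) =====
-- def get_pairs_by_point(players: list, played_pairs: list) -> list:
--     pairs_list = []
--     ref_list = []
--
--     for i in players:
--         for j in players:
--             if i != j and ((i, j) not in played_pairs and (
--                     j, i) not in played_pairs) and (
--                     (i, j) not in pairs_list and (
--                     j, i) not in pairs_list) and i not in ref_list and j not in ref_list:
--                 pairs_list.append((i, j))
--                 ref_list.append(i)
--                 ref_list.append(j)
--
--     return pairs_list
-- ===== SOURCE B (Python) =====
-- def get_pairs_by_point(players: list, played_pairs: list) -> list: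
--     played = set(played_pairs)
--     pairs = []
--     remaining = list(players)
--     while remaining:
--         i = remaining[0]
--         rest = remaining[1:]
--         partner = None
--         for j in rest:
--             if j != i and (i, j) not in played and (j, i) not in played:
--                 partner = j
--                 break
--         if partner is None:
--             remaining = [x for x in rest if x != i]
--         else:
--             pairs.append((i, partner))
--             remaining = [x for x in rest if x != i and x != partner]
--     return pairs
-- ===== Notes on version B (the rewrite author's own statement) =====
-- stated objective: faster
-- what changed: Replaces A's two full nested loops over players with their ref_list/pairs_list linear membership scans by a single shrinking work queue: pop the head, find the first admissible partner in the remaining queue via O(1) hash-set lookups of played pairs, and filter both values out of the queue.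
import Mathlib
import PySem

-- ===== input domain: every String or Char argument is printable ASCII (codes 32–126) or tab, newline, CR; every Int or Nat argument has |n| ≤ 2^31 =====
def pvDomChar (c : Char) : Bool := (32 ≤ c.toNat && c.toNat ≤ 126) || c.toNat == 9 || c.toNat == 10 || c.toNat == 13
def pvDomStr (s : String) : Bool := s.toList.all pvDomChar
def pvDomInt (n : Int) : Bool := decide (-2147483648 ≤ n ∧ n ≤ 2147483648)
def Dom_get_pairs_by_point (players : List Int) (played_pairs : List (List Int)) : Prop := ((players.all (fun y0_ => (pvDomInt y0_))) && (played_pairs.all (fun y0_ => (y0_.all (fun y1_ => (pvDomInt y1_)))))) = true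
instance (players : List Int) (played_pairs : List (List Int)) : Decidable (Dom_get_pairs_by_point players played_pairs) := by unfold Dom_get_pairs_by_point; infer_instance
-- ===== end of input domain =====

-- B replaces A's O(n²) double scan with ref_list/pairs_list markers by a single shrinking work
-- queue plus a hash set of played pairs; same return value, B is faster (objective: faster).

-- ===== PORT A =====
-- the body of A's inner `for j` loop (pairs are 2-tuples, ported as 2-element lists)
def pvAStep (played_pairs : List (List Int)) (i : Int)
    (st : List (List Int) × List Int) (j : Int) : List (List Int) × List Int :=
  if i ≠ j ∧ ([i, j] ∉ played_pairs ∧ [j, i] ∉ played_pairs) ∧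
     ([i, j] ∉ st.1 ∧ [j, i] ∉ st.1) ∧ i ∉ st.2 ∧ j ∉ st.2 then
    (st.1 ++ [[i, j]], st.2 ++ [i, j])
  else st

def get_pairs_by_point (players : List Int) (played_pairs : List (List Int)) : List (List Int) :=
  (players.foldl (fun st i => players.foldl (pvAStep played_pairs i) st)
    (([] : List (List Int)), ([] : List Int))).1

-- ===== PORT B =====
-- Source B's `while remaining` loop: pop the head i, scan the tail for the first admissible
-- partner, then rebuild the queue by value-based filtering.
def pvAltLoop (played : PySem.Set (List Int)) : List Int → List (List Int)
  | [] => []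
  | i :: rest =>
    match rest.find? (fun j => decide (j ≠ i) &&
        !(PySem.Set.contains played [i, j]) && !(PySem.Set.contains played [j, i])) with
    | none => pvAltLoop played (rest.filter (fun x => decide (x ≠ i)))
    | some j => [i, j] :: pvAltLoop played (rest.filter (fun x => decide (x ≠ i) && decide (x ≠ j)))
termination_by remaining => remaining.length
decreasing_by
  all_goals
    simp only [List.length_unattach]
    exact Nat.lt_succ_of_le (le_trans (List.length_filter_le _ _) (by simp))

def get_pairs_by_point_alt (players : List Int) (played_pairs : List (List Int)) : List (List Int) :=
  pvAltLoop (PySem.Set.ofList played_pairs) players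

-- ===== PRECONDITION & SPEC =====
def Spec_get_pairs_by_point (players : List Int) (played_pairs : List (List Int)) (out : List (List Int)) : Prop := out = get_pairs_by_point_alt players played_pairs
instance (players : List Int) (played_pairs : List (List Int)) (out : List (List Int)) : Decidable (Spec_get_pairs_by_point players played_pairs out) := by unfold Spec_get_pairs_by_point; infer_instance

-- ===== CLAIM (what is proved, stated in full; the proofs are below) =====
def Claim_equal_get_pairs_by_point : Prop := ∀ (players : List Int) (played_pairs : List (List Int)), Dom_get_pairs_by_point players played_pairs → Spec_get_pairs_by_point players played_pairs (get_pairs_by_point players played_pairs)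

-- ===== LEMMAS AND PROOFS =====

-- the predicate A's inner loop effectively tests once i is known unused and P well formed
def pvQ (pd : List (List Int)) (R : List Int) (i j : Int) : Bool :=
  decide (i ≠ j) && !decide ([i, j] ∈ pd) && !decide ([j, i] ∈ pd) && !decide (j ∈ R)

-- which elements of the rest of the players list are still in B's queue
def pvKeep (R D : List Int) (x : Int) : Bool := !decide (x ∈ R) && !decide (x ∈ D)

-- invariant: every recorded pair has both members marked used
def pvPInv (P : List (List Int)) (R : List Int) : Prop :=
  ∀ p ∈ P, ∃ a b, p = [a, b] ∧ a ∈ R ∧ b ∈ R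

theorem pv_inner_noop (pd : List (List Int)) (i : Int) (st : List (List Int) × List Int)
    (h : i ∈ st.2) : ∀ l : List Int, l.foldl (pvAStep pd i) st = st := by
  intro l
  induction l with
  | nil => rfl
  | cons j t ih =>
    have : pvAStep pd i st j = st := by
      unfold pvAStep
      rw [if_neg]
      intro hc
      exact hc.2.2.2.1 h
    simp [List.foldl_cons, this, ih]

theorem pv_inner_char (pd : List (List Int)) (i : Int) (P : List (List Int)) (R : List Int)
    (hiR : i ∉ R) (hP : pvPInv P R) :
    ∀ l : List Int, l.foldl (pvAStep pd i) (P, R) =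
      match l.find? (pvQ pd R i) with
      | none => (P, R)
      | some j => (P ++ [[i, j]], R ++ [i, j]) := by
  intro l
  induction l with
  | nil => rfl
  | cons j t ih =>
    by_cases hq : pvQ pd R i j = true
    · have hq' := hq
      unfold pvQ at hq'
      simp only [Bool.and_eq_true, Bool.not_eq_true', decide_eq_false_iff_not,
        decide_eq_true_eq] at hq'
      obtain ⟨⟨⟨hij, hp1⟩, hp2⟩, hjR⟩ := hq'
      have hstep : pvAStep pd i (P, R) j = (P ++ [[i, j]], R ++ [i, j]) := by
        unfold pvAStep
        rw [if_pos]
        refine ⟨hij, ⟨hp1, hp2⟩, ⟨?_, ?_⟩, hiR, hjR⟩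
        · intro hm
          obtain ⟨a, b, he, ha, _⟩ := hP _ hm
          have hia : i = a := by simpa using congrArg (fun l => l.headI) he
          apply hiR; rw [hia]; exact ha
        · intro hm
          obtain ⟨a, b, he, _, hb⟩ := hP _ hm
          have hib : i = b := by simpa using congrArg (fun l => l.tail.headI) he
          apply hiR; rw [hib]; exact hb
      have hmem : i ∈ (R ++ [i, j]) := by simp
      rw [List.foldl_cons, hstep, pv_inner_noop pd i _ hmem t, List.find?_cons, hq]
    · have hq' : pvQ pd R i j = false := by simpa using hq
      have hstep : pvAStep pd i (P, R) j = (P, R) := by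
        unfold pvAStep
        rw [if_neg]
        intro hc
        apply hq
        unfold pvQ
        simp only [Bool.and_eq_true, Bool.not_eq_true', decide_eq_false_iff_not,
          decide_eq_true_eq]
        obtain ⟨h1, ⟨h2, h3⟩, _, _, h6⟩ := hc
        exact ⟨⟨⟨h1, h2⟩, h3⟩, h6⟩
      rw [List.foldl_cons, hstep, List.find?_cons, hq', ih]

theorem pv_find_filter_congr {α : Type} (p q' keep : α → Bool) :
    ∀ l : List α, (∀ x ∈ l, (keep x = false → q' x = false) ∧ (keep x = true → q' x = p x)) →
      l.find? q' = (l.filter keep).find? p := by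
  intro l
  induction l with
  | nil => intro _; rfl
  | cons x t ih =>
    intro h
    have hx := h x (by simp)
    have ht : ∀ y ∈ t, (keep y = false → q' y = false) ∧ (keep y = true → q' y = p y) :=
      fun y hy => h y (by simp [hy])
    by_cases hk : keep x = true
    · rw [List.filter_cons_of_pos hk, List.find?_cons, List.find?_cons, hx.2 hk]
      cases hpx : p x with
      | true => rfl
      | false => exact ih ht
    · have hk' : keep x = false := by simpa using hk
      rw [List.filter_cons_of_neg (by simp [hk']), List.find?_cons, hx.1 hk']
      exact ih ht

-- B's set membership unfolded back to list membership
theorem pv_contains (pd : List (List Int)) (y : List Int) :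
    PySem.Set.contains (PySem.Set.ofList pd) y = decide (y ∈ pd) := by
  by_cases h : y ∈ pd <;> simp [PySem.Set.contains_eq_listContains, PySem.Set.mem_ofList, h]

theorem pv_main (ps : List Int) (pd : List (List Int)) :
    ∀ (suf pre : List Int) (P : List (List Int)) (R D : List Int),
      ps = pre ++ suf →
      pvPInv P R →
      (∀ x ∈ pre, x ∉ R → x ∈ D) →
      (∀ d ∈ D, ∀ x ∈ ps, x ∉ R → x = d ∨ [d, x] ∈ pd ∨ [x, d] ∈ pd) →
      (suf.foldl (fun st i => ps.foldl (pvAStep pd i) st) (P, R)).1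
        = P ++ pvAltLoop (PySem.Set.ofList pd) (suf.filter (pvKeep R D)) := by
  intro suf
  induction suf with
  | nil =>
    intro pre P R D _ _ _ _
    simp [pvAltLoop]
  | cons i t ih =>
    intro pre P R D hsplit hP hpre hD
    rw [List.foldl_cons]
    by_cases hiR : i ∈ R
    · -- i already used: A's inner loop is a no-op, i is not in B's queue
      rw [pv_inner_noop pd i (P, R) hiR ps]
      have hkeep : pvKeep R D i = false := by simp [pvKeep, hiR]
      rw [List.filter_cons_of_neg (by simp [hkeep])]
      exact ih (pre ++ [i]) P R D (by simpa using hsplit) hP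
        (by intro x hx hxR
            rcases List.mem_append.1 hx with h | h
            · exact hpre x h hxR
            · simp only [List.mem_singleton] at h; exact absurd (h ▸ hiR) hxR) hD
    · rw [pv_inner_char pd i P R hiR hP ps]
      by_cases hiD : i ∈ D
      · -- i was dropped earlier: no partner can exist for it any more
        have hnone : ps.find? (pvQ pd R i) = none := by
          rw [List.find?_eq_none]
          intro x hx hq
          unfold pvQ at hq
          simp only [Bool.and_eq_true, Bool.not_eq_true', decide_eq_false_iff_not,
            decide_eq_true_eq] at hq
          obtain ⟨⟨⟨hij, hp1⟩, hp2⟩, hxR⟩ := hq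
          rcases hD i hiD x hx hxR with h | h | h
          · exact hij h.symm
          · exact hp1 h
          · exact hp2 h
        rw [hnone]
        have hkeep : pvKeep R D i = false := by simp [pvKeep, hiD]
        rw [List.filter_cons_of_neg (by simp [hkeep])]
        exact ih (pre ++ [i]) P R D (by simpa using hsplit) hP
          (by intro x hx _
              rcases List.mem_append.1 hx with h | h
              · exact hpre x h ‹x ∉ R›
              · simp only [List.mem_singleton] at h; exact h ▸ hiD) hD
      · -- i is the head of B's queue
        have hkeep : pvKeep R D i = true := by simp [pvKeep, hiR, hiD]
        rw [List.filter_cons_of_pos hkeep]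
        rw [pvAltLoop]
        -- A's scan over the whole players list finds the same partner as B's scan of the queue
        have hfind : ps.find? (pvQ pd R i)
            = (t.filter (pvKeep R D)).find? (fun j => decide (j ≠ i) &&
                !(PySem.Set.contains (PySem.Set.ofList pd) [i, j]) &&
                !(PySem.Set.contains (PySem.Set.ofList pd) [j, i])) := by
          rw [hsplit, List.find?_append]
          have hpre_none : pre.find? (pvQ pd R i) = none := by
            rw [List.find?_eq_none]
            intro x hx hq
            unfold pvQ at hq
            simp only [Bool.and_eq_true, Bool.not_eq_true', decide_eq_false_iff_not,
              decide_eq_true_eq] at hq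
            obtain ⟨⟨⟨hij, hp1⟩, hp2⟩, hxR⟩ := hq
            have hxD : x ∈ D := hpre x hx hxR
            rcases hD x hxD i (by rw [hsplit]; simp) hiR with h | h | h
            · exact hij h
            · exact hp2 h
            · exact hp1 h
          rw [hpre_none, Option.none_or, List.find?_cons]
          have : pvQ pd R i i = false := by simp [pvQ]
          rw [this]
          apply pv_find_filter_congr
          intro x hx
          have hxps : x ∈ ps := by rw [hsplit]; simp [hx]
          constructor
          · intro hkf
            unfold pvKeep at hkf
            simp only [Bool.and_eq_false_iff, Bool.not_eq_false', decide_eq_true_eq] at hkf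
            rcases hkf with hxR | hxD
            · unfold pvQ; simp [hxR]
            · by_contra hne
              have hq : pvQ pd R i x = true := by simpa using hne
              unfold pvQ at hq
              simp only [Bool.and_eq_true, Bool.not_eq_true', decide_eq_false_iff_not,
                decide_eq_true_eq] at hq
              obtain ⟨⟨⟨hij, hp1⟩, hp2⟩, hxR⟩ := hq
              rcases hD x hxD x hxps hxR with h | h | h
              · rcases hD x hxD i (by rw [hsplit]; simp) hiR with h' | h' | h'
                · exact hij h'
                · exact hp2 h'
                · exact hp1 h'
              · rcases hD x hxD i (by rw [hsplit]; simp) hiR with h' | h' | h'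
                · exact hij h'
                · exact hp2 h'
                · exact hp1 h'
              · rcases hD x hxD i (by rw [hsplit]; simp) hiR with h' | h' | h'
                · exact hij h'
                · exact hp2 h'
                · exact hp1 h'
          · intro hkt
            unfold pvKeep at hkt
            simp only [Bool.and_eq_true, Bool.not_eq_true', decide_eq_false_iff_not] at hkt
            show pvQ pd R i x = _
            unfold pvQ
            simp only [pv_contains, hkt.1, decide_not]
            by_cases hxi : x = i
            · simp [hxi]
            · simp [hxi, Ne.symm hxi]
        rw [hfind]
        cases hf : (t.filter (pvKeep R D)).find? (fun j => decide (j ≠ i) &&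
            !(PySem.Set.contains (PySem.Set.ofList pd) [i, j]) &&
            !(PySem.Set.contains (PySem.Set.ofList pd) [j, i])) with
        | none =>
          -- no partner: A leaves its state, B drops i from the queue
          dsimp only
          have hfilter : (t.filter (pvKeep R D)).filter (fun x => decide (x ≠ i))
              = t.filter (pvKeep R (i :: D)) := by
            rw [List.filter_filter]
            apply List.filter_congr
            intro x _
            unfold pvKeep
            by_cases hxi : x = i <;> by_cases hxR : x ∈ R <;> simp [hxi, hxR]
          rw [hfilter]
          have hnone' : ps.find? (pvQ pd R i) = none := by
            rw [hfind, hf]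
          have hDnone : ∀ x ∈ ps, x ∉ R → x = i ∨ [i, x] ∈ pd ∨ [x, i] ∈ pd := by
            intro x hx hxR
            have hnq := List.find?_eq_none.1 hnone' x hx
            by_cases hxi : x = i
            · exact Or.inl hxi
            · by_cases hp1 : [i, x] ∈ pd
              · exact Or.inr (Or.inl hp1)
              · by_cases hp2 : [x, i] ∈ pd
                · exact Or.inr (Or.inr hp2)
                · exfalso
                  apply hnq
                  unfold pvQ
                  simp only [Bool.and_eq_true, Bool.not_eq_true', decide_eq_false_iff_not,
                    decide_eq_true_eq]
                  exact ⟨⟨⟨Ne.symm hxi, hp1⟩, hp2⟩, hxR⟩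
          exact ih (pre ++ [i]) P R (i :: D) (by simpa using hsplit) hP
            (by intro x hx _
                rcases List.mem_append.1 hx with h | h
                · exact List.mem_cons_of_mem _ (hpre x h ‹x ∉ R›)
                · simp only [List.mem_singleton] at h; exact h ▸ List.mem_cons_self)
            (by intro d hd x hx hxR
                rcases List.mem_cons.1 hd with h | h
                · subst h; exact hDnone x hx hxR
                · exact hD d h x hx hxR)
        | some j =>
          -- partner j found: A records [i, j] and marks both, B removes both from the queue
          dsimp only
          have hfilter : (t.filter (pvKeep R D)).filter (fun x => decide (x ≠ i) && decide (x ≠ j))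
              = t.filter (pvKeep (R ++ [i, j]) D) := by
            rw [List.filter_filter]
            apply List.filter_congr
            intro x _
            unfold pvKeep
            by_cases hxi : x = i <;> by_cases hxj : x = j <;> by_cases hxR : x ∈ R <;>
              simp [hxi, hxj, hxR]
          rw [hfilter]
          have heq : P ++ [i, j] :: pvAltLoop (PySem.Set.ofList pd) (t.filter (pvKeep (R ++ [i, j]) D))
              = (P ++ [[i, j]]) ++ pvAltLoop (PySem.Set.ofList pd) (t.filter (pvKeep (R ++ [i, j]) D)) := by
            simp
          rw [heq]
          exact ih (pre ++ [i]) (P ++ [[i, j]]) (R ++ [i, j]) D (by simpa using hsplit)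
            (by intro p hp
                rcases List.mem_append.1 hp with h | h
                · obtain ⟨a, b, he, ha, hb⟩ := hP p h
                  exact ⟨a, b, he, List.mem_append_left _ ha, List.mem_append_left _ hb⟩
                · simp only [List.mem_singleton] at h
                  exact ⟨i, j, h, by simp, by simp⟩)
            (by intro x hx hxR
                rcases List.mem_append.1 hx with h | h
                · exact hpre x h (fun hr => hxR (List.mem_append_left _ hr))
                · simp only [List.mem_singleton] at h
                  exact absurd (by simp [h]) hxR)
            (by intro d hd x hx hxR
                exact hD d hd x hx (fun hr => hxR (List.mem_append_left _ hr)))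

-- ===== VERDICT (by name: the statement is the Claim_ definition above) =====
theorem get_pairs_by_point_spec : Claim_equal_get_pairs_by_point := by
  intro players played_pairs _
  unfold Spec_get_pairs_by_point get_pairs_by_point get_pairs_by_point_alt
  have h := pv_main players played_pairs players [] [] [] [] rfl
    (by intro p hp; cases hp) (by intro x hx; cases hx) (by intro d hd; cases hd)
  rw [h]
  have : players.filter (pvKeep [] []) = players :=
    List.filter_eq_self.2 (by intro x _; simp [pvKeep])
  rw [this]
  simp
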